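-- pv_equiv track=rewrite | github.com/csaye/symbl | src/parser.py | minify
-- ===== SOURCE A (Python) =====
-- def minify(prog):
--     new_prog = ''
--     i = 0
--     # for each character in program
--     while i < len(prog):
--         char = prog[i]
--         # if comment, skip to end of line
--         if char == '#':
--             while i < len(prog) and prog[i] != '\n': i += 1
--         # if not whitespace, append char
--         elif not char.isspace(): new_prog += prog[i]
--         i += 1
--     return new_prog
-- ===== SOURCE B (Python) =====
-- def _line(line):
--     # text before the first '#', with all whitespace characters removed
--     return ''.join(c for c in line.split('#', 1)[0] if not c.isspace())
--
-- def minify(prog):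
--     return ''.join(_line(line) for line in prog.split('\n'))
-- ===== Notes on version B (the rewrite author's own statement) =====
-- stated objective: faster
-- what changed: Replaces the index-walking while loop (with inner comment-skip loop and quadratic new_prog += char string concatenation) by a two-stage decomposition: split on newlines, truncate each line at its first '#', drop whitespace characters, and join once.
import Mathlib
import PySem

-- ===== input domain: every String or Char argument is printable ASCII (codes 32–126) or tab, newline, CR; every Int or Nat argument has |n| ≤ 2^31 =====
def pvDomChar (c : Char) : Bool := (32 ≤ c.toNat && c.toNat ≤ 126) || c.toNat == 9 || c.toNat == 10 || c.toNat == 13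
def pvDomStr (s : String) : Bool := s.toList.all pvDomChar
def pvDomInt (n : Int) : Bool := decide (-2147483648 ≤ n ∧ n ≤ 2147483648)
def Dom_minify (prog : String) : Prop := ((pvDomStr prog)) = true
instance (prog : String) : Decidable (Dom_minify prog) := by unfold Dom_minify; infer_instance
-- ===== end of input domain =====

-- B replaces A's index-walking loop (with an inner comment-skip loop) by a two-stage
-- decomposition: split on newlines, truncate each line at its first '#', drop whitespace, join.

-- ===== PORT A =====
-- inner 'while i < len(prog) and prog[i] != '\n': i += 1' — leaves the remaining
-- suffix starting at the '\n' (or empty at end of string)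
def minifySkip : List Char → List Char
  | [] => []
  | c :: rest => if c = '\n' then c :: rest else minifySkip rest

-- termination helper for the outer loop, cited in decreasing_by
theorem minifySkip_length_le (l : List Char) : (minifySkip l).length ≤ l.length := by
  induction l with
  | nil => simp [minifySkip]
  | cons c rest ih => simp only [minifySkip]; split <;> simp <;> omega

-- outer 'while i < len(prog)' loop over the suffix at index i; on '#' the inner loop
-- runs (starting at the '#', which is ≠ '\n', so it first steps past it: minifySkip rest),
-- then the outer 'i += 1' consumes the '\n' it stopped on.
def minifyLoop : List Char → List Char
  | [] => []
  | c :: rest =>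
    if c = '#' then
      match h : minifySkip rest with
      | [] => []
      | _ :: rest' => minifyLoop rest'
    else if PySem.Chars.isspace c then minifyLoop rest
    else c :: minifyLoop rest
termination_by l => l.length
decreasing_by
  · have hle := minifySkip_length_le rest
    rw [h] at hle; simp at hle ⊢; omega
  · simp
  · simp

def minify (prog : String) : String := String.mk (minifyLoop prog.toList)

-- ===== PORT B =====
-- _line: line.split('#', 1)[0] is the prefix before the first '#' (takeWhile, exact),
-- then keep the non-whitespace characters
def minifyLine (line : List Char) : List Char :=
  (line.takeWhile (fun c => c != '#')).filter (fun c => !PySem.Chars.isspace c)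

def minify_alt (prog : String) : String :=
  String.mk ((prog.toList.splitOn '\n').map minifyLine).flatten

-- ===== PRECONDITION & SPEC =====
def Spec_minify (prog : String) (out : String) : Prop := out = minify_alt prog
instance (prog : String) (out : String) : Decidable (Spec_minify prog out) := by unfold Spec_minify; infer_instance

-- ===== CLAIM (what is proved, stated in full; the proofs are below) =====
def Claim_equal_minify : Prop := ∀ (prog : String), Dom_minify prog → Spec_minify prog (minify prog)

-- ===== LEMMAS AND PROOFS =====
-- B's whole computation on a character list
def mfB (l : List Char) : List Char := ((l.splitOn '\n').map minifyLine).flatten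

theorem splitOn_cons_self (l : List Char) : ('\n' :: l).splitOn '\n' = [] :: l.splitOn '\n' := by
  simp [List.splitOn, List.splitOnP_cons]

theorem splitOn_cons_ne (c : Char) (l : List Char) (h : c ≠ '\n') :
    (c :: l).splitOn '\n' = (l.splitOn '\n').modifyHead (c :: ·) := by
  simp [List.splitOn, List.splitOnP_cons, h]

theorem splitOn_ne_nil (l : List Char) : l.splitOn '\n' ≠ [] := by
  simp only [List.splitOn]; exact List.splitOnP_ne_nil _ l

-- the part of B after the first line equals A's state after the comment-skip loop
theorem tailflat (l : List Char) :
    (((l.splitOn '\n').tail).map minifyLine).flatten =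
      (match minifySkip l with
       | [] => ([] : List Char)
       | _ :: r => mfB r) := by
  induction l with
  | nil => simp [List.splitOn, List.splitOnP_nil, minifySkip]
  | cons c rest ih =>
    by_cases hc : c = '\n'
    · subst hc
      rw [splitOn_cons_self]
      simp [minifySkip, mfB]
    · rw [splitOn_cons_ne c rest hc, List.tail_modifyHead]
      rw [ih]
      simp [minifySkip, hc]

theorem main_loop : ∀ n l, l.length ≤ n → minifyLoop l = mfB l := by
  intro n
  induction n with
  | zero =>
    intro l hl
    have : l = [] := List.eq_nil_of_length_eq_zero (Nat.le_zero.mp hl)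
    subst this
    simp [minifyLoop, mfB, List.splitOn, List.splitOnP_nil, minifyLine]
  | succ n ih =>
    intro l hl
    match l with
    | [] => simp [minifyLoop, mfB, List.splitOn, List.splitOnP_nil, minifyLine]
    | c :: rest =>
      have hrest : rest.length ≤ n := by simpa using hl
      obtain ⟨h0, t0, hsplit⟩ := List.exists_cons_of_ne_nil (splitOn_ne_nil rest)
      by_cases hc : c = '#'
      · subst hc
        have hne : ('#' : Char) ≠ '\n' := by decide
        rw [minifyLoop]
        simp only [if_pos rfl]
        have hBtail : mfB ('#' :: rest) = (((rest.splitOn '\n').tail).map minifyLine).flatten := by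
          unfold mfB
          rw [splitOn_cons_ne _ _ hne, hsplit]
          simp [minifyLine, List.takeWhile]
        rw [hBtail, tailflat]
        cases hsk : minifySkip rest with
        | nil => simp
        | cons d r' =>
          have hle := minifySkip_length_le rest
          rw [hsk] at hle
          simp at hle
          exact ih r' (by omega)
      · by_cases hnl : c = '\n'
        · subst hnl
          rw [minifyLoop]
          have : PySem.Chars.isspace '\n' = true := by decide
          simp only [if_neg hc, this, if_pos rfl]
          unfold mfB
          rw [splitOn_cons_self]
          simp [minifyLine]
          exact ih rest hrest
        · rw [minifyLoop]
          simp only [if_neg hc]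
          have hB : mfB (c :: rest) =
              (if PySem.Chars.isspace c then ([] : List Char) else [c]) ++ mfB rest := by
            unfold mfB
            rw [splitOn_cons_ne _ _ hnl, hsplit]
            simp only [List.modifyHead, List.map_cons, List.flatten_cons]
            have : minifyLine (c :: h0) =
                (if PySem.Chars.isspace c then ([] : List Char) else [c]) ++ minifyLine h0 := by
              unfold minifyLine
              rw [List.takeWhile_cons_of_pos (by simp [hc])]
              by_cases hs : PySem.Chars.isspace c <;> simp [List.filter_cons, hs]
            rw [this]
            simp
          rw [hB, ih rest hrest]
          split_ifs <;> simp

-- ===== VERDICT (by name: the statement is the Claim_ definition above) =====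
theorem minify_spec : Claim_equal_minify := by
  intro prog _
  unfold Spec_minify minify minify_alt
  rw [main_loop prog.toList.length prog.toList (le_refl _)]
  rfl
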